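-- pv_equiv track=rewrite | github.com/khj874869/quantTradingBot | quantbot/execution/adapters/paper_adapter.py | _parse_symbol_base_quote
-- ===== SOURCE A (Python) =====
-- def _parse_symbol_base_quote(venue: str, symbol: str) -> tuple[str, str]:
--     # Keep compatible with live._parse_symbol_base_quote without importing to avoid cycles.
--     if venue == "upbit":
--         if "-" in symbol:
--             q, b = symbol.split("-", 1)
--             return b, q
--         return symbol, "KRW"
--
--     if venue == "binance":
--         quotes = ["USDT", "USDC", "BUSD", "FDUSD", "TUSD", "BTC", "ETH", "BNB", "TRY", "EUR", "GBP", "BRL", "AUD", "KRW", "JPY"]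
--         for q in sorted(quotes, key=len, reverse=True):
--             if symbol.endswith(q) and len(symbol) > len(q):
--                 return symbol[:-len(q)], q
--         return symbol, ""
--     return symbol, ""
-- ===== SOURCE B (Python) =====
-- _BINANCE_QUOTES = frozenset([
--     "USDT", "USDC", "BUSD", "FDUSD", "TUSD", "BTC", "ETH", "BNB",
--     "TRY", "EUR", "GBP", "BRL", "AUD", "KRW", "JPY",
-- ])
-- _QUOTE_LENGTHS = (5, 4, 3)
--
--
-- def _parse_symbol_base_quote(venue: str, symbol: str) -> tuple[str, str]:
--     if venue == "upbit":
--         if "-" in symbol: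
--             q, b = symbol.split("-", 1)
--             return b, q
--         return symbol, "KRW"
--
--     if venue == "binance":
--         for L in _QUOTE_LENGTHS:
--             if len(symbol) > L and symbol[-L:] in _BINANCE_QUOTES:
--                 return symbol[:-L], symbol[-L:]
--     return symbol, ""
-- ===== Notes on version B (the rewrite author's own statement) =====
-- stated objective: idiomatic
-- what changed: For binance, instead of sorting the quote list by length on every call and scanning every quote with endswith, B iterates over the three distinct suffix lengths (5, 4, 3) from longest to shortest and tests the suffix of that length for membership in a precomputed frozenset of quotes, so the loop runs over lengths rather than over quotes.
import Mathlib
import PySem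

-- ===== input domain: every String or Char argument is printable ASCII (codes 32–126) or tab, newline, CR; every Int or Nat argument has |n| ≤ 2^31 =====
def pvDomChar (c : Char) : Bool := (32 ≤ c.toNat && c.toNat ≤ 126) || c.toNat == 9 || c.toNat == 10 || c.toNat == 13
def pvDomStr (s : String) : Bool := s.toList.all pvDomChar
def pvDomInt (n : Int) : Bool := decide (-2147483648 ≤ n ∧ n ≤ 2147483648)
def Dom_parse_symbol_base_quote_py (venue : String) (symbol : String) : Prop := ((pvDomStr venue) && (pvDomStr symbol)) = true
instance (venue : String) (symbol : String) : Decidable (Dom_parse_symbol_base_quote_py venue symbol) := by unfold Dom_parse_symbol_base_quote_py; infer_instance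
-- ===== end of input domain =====

-- B replaces A's per-call length-sort and per-quote endswith scan (binance branch) by a loop
-- over the three distinct suffix lengths with a set-membership test; objective: more idiomatic.

-- ===== PORT A =====
def pvQuotesA : List String :=
  ["USDT", "USDC", "BUSD", "FDUSD", "TUSD", "BTC", "ETH", "BNB", "TRY", "EUR", "GBP", "BRL", "AUD", "KRW", "JPY"]

def pvLoopA (symbol : String) : List String → String × String
  | [] => (symbol, "")
  | q :: rest =>
    if PySem.Str.endswith symbol q && decide (PySem.Str.len q < PySem.Str.len symbol) then
      (PySem.Str.slice symbol none (some (-(PySem.Str.len q))), q)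
    else pvLoopA symbol rest

def parse_symbol_base_quote_py (venue : String) (symbol : String) : String × String :=
  if venue == "upbit" then
    if PySem.Str.isIn "-" symbol then
      match PySem.Str.splitMax? symbol "-" 1 with
      | some (q :: b :: _) => (b, q)
      | _ => (symbol, "KRW")   -- unreachable: splitting on a present separator yields two parts
    else (symbol, "KRW")
  else if venue == "binance" then
    pvLoopA symbol (PySem.List.sorted pvQuotesA (fun q => PySem.Str.len q) true)
  else (symbol, "")

-- ===== PORT B =====
def pvBinanceQuoteSet : PySem.Set String :=
  PySem.Set.ofList ["USDT", "USDC", "BUSD", "FDUSD", "TUSD", "BTC", "ETH", "BNB", "TRY", "EUR", "GBP", "BRL", "AUD", "KRW", "JPY"]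

def pvLoopB (symbol : String) : List Nat → String × String
  | [] => (symbol, "")
  | L :: rest =>
    if decide ((L : Int) < PySem.Str.len symbol) && PySem.Set.contains pvBinanceQuoteSet (PySem.Str.slice symbol (some (-(L : Int))) none) then
      (PySem.Str.slice symbol none (some (-(L : Int))), PySem.Str.slice symbol (some (-(L : Int))) none)
    else pvLoopB symbol rest

def parse_symbol_base_quote_py_alt (venue : String) (symbol : String) : String × String :=
  if venue == "upbit" then
    if PySem.Str.isIn "-" symbol then
      match PySem.Str.splitMax? symbol "-" 1 with
      | none => (symbol, "KRW")
      | some [] => (symbol, "KRW")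
      | some (q :: rest) =>
        match rest with
        | [] => (symbol, "KRW")
        | b :: _ => (b, q)
    else (symbol, "KRW")
  else if venue == "binance" then
    pvLoopB symbol [5, 4, 3]
  else (symbol, "")

-- ===== PRECONDITION & SPEC =====
def Spec_parse_symbol_base_quote_py (venue : String) (symbol : String) (out : String × String) : Prop := out = parse_symbol_base_quote_py_alt venue symbol
instance (venue : String) (symbol : String) (out : String × String) : Decidable (Spec_parse_symbol_base_quote_py venue symbol out) := by unfold Spec_parse_symbol_base_quote_py; infer_instance

-- ===== CLAIM (what is proved, stated in full; the proofs are below) =====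
def Claim_equal_parse_symbol_base_quote_py : Prop := ∀ (venue : String) (symbol : String), Dom_parse_symbol_base_quote_py venue symbol → Spec_parse_symbol_base_quote_py venue symbol (parse_symbol_base_quote_py venue symbol)

-- ===== LEMMAS AND PROOFS =====

-- the suffix symbol[-L:]
def pvSfx (s : String) (L : Nat) : String := PySem.Str.slice s (some (-(L : Int))) none

def pvQs5 : List String := ["FDUSD"]
def pvQs4 : List String := ["USDT", "USDC", "BUSD", "TUSD"]
def pvQs3 : List String := ["BTC", "ETH", "BNB", "TRY", "EUR", "GBP", "BRL", "AUD", "KRW", "JPY"]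

theorem pvSfx_toList (s : String) (L : Nat) (hL : 0 < L) :
    (pvSfx s L).toList = s.toList.drop (s.toList.length - L) := by
  simp [pvSfx, PySem.List.slice_from_neg_natCast _ _ hL]

theorem pvSfx_len (s : String) (L : Nat) (hL : 0 < L) (hn : L ≤ s.toList.length) :
    (pvSfx s L).toList.length = L := by
  rw [pvSfx_toList s L hL, List.length_drop]; omega

theorem pvEndswith_iff (s q : String) (L : Nat) (hL : 0 < L) (hq : q.toList.length = L) :
    PySem.Str.endswith s q = true ↔ pvSfx s L = q := by
  rw [PySem.Str.endswith_eq, PySem.Chars.endswith_iff, List.suffix_iff_eq_drop, hq,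
      ← String.toList_inj, pvSfx_toList s L hL]
  exact eq_comm

theorem pvLoopA_group (s : String) (L : Nat) (hL : 0 < L) (qs rest : List String)
    (hlen : ∀ q ∈ qs, q.toList.length = L) :
    pvLoopA s (qs ++ rest) =
      if L < s.toList.length ∧ pvSfx s L ∈ qs then
        (PySem.Str.slice s none (some (-(L : Int))), pvSfx s L)
      else pvLoopA s rest := by
  induction qs with
  | nil => simp
  | cons q qs ih =>
    have hq : q.toList.length = L := hlen q (List.mem_cons_self ..)
    have ih' := ih (fun r hr => hlen r (List.mem_cons_of_mem _ hr))
    rw [List.cons_append]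
    by_cases hc : PySem.Str.endswith s q = true ∧ L < s.toList.length
    · have hsfx : pvSfx s L = q := (pvEndswith_iff s q L hL hq).mp hc.1
      have h2 : PySem.Str.len q < PySem.Str.len s := by
        rw [PySem.Str.len_eq, PySem.Str.len_eq, hq]; exact_mod_cast hc.2
      have hcond : (PySem.Str.endswith s q && decide (PySem.Str.len q < PySem.Str.len s)) = true := by
        rw [Bool.and_eq_true]; exact ⟨hc.1, decide_eq_true h2⟩
      have hlen' : PySem.Str.len q = (L : Int) := by rw [PySem.Str.len_eq, hq]
      simp only [pvLoopA, hcond, if_true]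
      rw [if_pos ⟨hc.2, hsfx ▸ List.mem_cons_self ..⟩, hsfx, hlen']
    · have hcond : (PySem.Str.endswith s q && decide (PySem.Str.len q < PySem.Str.len s)) = false := by
        cases he : PySem.Str.endswith s q with
        | false => rw [Bool.false_and]
        | true =>
          have hn : ¬ L < s.toList.length := fun h => hc ⟨he, h⟩
          have h2 : ¬ PySem.Str.len q < PySem.Str.len s := by
            rw [PySem.Str.len_eq, PySem.Str.len_eq, hq]; exact_mod_cast hn
          rw [Bool.true_and, decide_eq_false h2]
      simp only [pvLoopA, hcond, Bool.false_eq_true, if_false]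
      rw [ih']
      have hmem : (L < s.toList.length ∧ pvSfx s L ∈ qs) ↔ (L < s.toList.length ∧ pvSfx s L ∈ q :: qs) := by
        constructor
        · rintro ⟨h, hm⟩; exact ⟨h, List.mem_cons_of_mem _ hm⟩
        · rintro ⟨h, hm⟩
          rcases List.mem_cons.mp hm with h1 | h1
          · exact absurd ⟨(pvEndswith_iff s q L hL hq).mpr h1, h⟩ hc
          · exact ⟨h, h1⟩
      rw [if_congr hmem rfl rfl]

theorem pvLoopB_cons (s : String) (L : Nat) (rest : List Nat) :
    pvLoopB s (L :: rest) =
      if L < s.toList.length ∧ pvSfx s L ∈ pvBinanceQuoteSet then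
        (PySem.Str.slice s none (some (-(L : Int))), pvSfx s L)
      else pvLoopB s rest := by
  have e1 : decide ((L : Int) < PySem.Str.len s) = decide (L < s.toList.length) := by
    rw [PySem.Str.len_eq]; exact decide_eq_decide.mpr (by exact_mod_cast Iff.rfl)
  have e2 : PySem.Set.contains pvBinanceQuoteSet (PySem.Str.slice s (some (-(L : Int))) none)
      = decide (pvSfx s L ∈ pvBinanceQuoteSet) := by
    rw [show PySem.Str.slice s (some (-(L : Int))) none = pvSfx s L from rfl]
    simp [PySem.Set.contains_eq_listContains]
  simp only [pvLoopB, e1, e2]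
  by_cases h : L < s.toList.length ∧ pvSfx s L ∈ pvBinanceQuoteSet
  · rw [if_pos (by simp only [Bool.and_eq_true, decide_eq_true_eq]; exact ⟨h.1, h.2⟩), if_pos h]
    rfl
  · rw [if_neg (by simpa using h), if_neg h]

theorem pvBinEq (s : String) :
    pvLoopA s (PySem.List.sorted pvQuotesA (fun q => PySem.Str.len q) true) = pvLoopB s [5, 4, 3] := by
  have hs : PySem.List.sorted pvQuotesA (fun q => PySem.Str.len q) true
      = pvQs5 ++ (pvQs4 ++ (pvQs3 ++ ([] : List String))) := by decide
  rw [hs,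
    pvLoopA_group s 5 (by norm_num) pvQs5 _ (by decide),
    pvLoopA_group s 4 (by norm_num) pvQs4 _ (by decide),
    pvLoopA_group s 3 (by norm_num) pvQs3 _ (by decide),
    pvLoopB_cons s 5,
    pvLoopB_cons s 4,
    pvLoopB_cons s 3]
  have g5 : ∀ y ∈ pvBinanceQuoteSet, y.toList.length = 5 → y ∈ pvQs5 := by decide
  have b5 : ∀ y ∈ pvQs5, y ∈ pvBinanceQuoteSet := by decide
  have g4 : ∀ y ∈ pvBinanceQuoteSet, y.toList.length = 4 → y ∈ pvQs4 := by decide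
  have b4 : ∀ y ∈ pvQs4, y ∈ pvBinanceQuoteSet := by decide
  have g3 : ∀ y ∈ pvBinanceQuoteSet, y.toList.length = 3 → y ∈ pvQs3 := by decide
  have b3 : ∀ y ∈ pvQs3, y ∈ pvBinanceQuoteSet := by decide
  have c5 : (5 < s.toList.length ∧ pvSfx s 5 ∈ pvQs5) ↔ (5 < s.toList.length ∧ pvSfx s 5 ∈ pvBinanceQuoteSet) := by
    constructor <;> rintro ⟨h, hm⟩
    · exact ⟨h, b5 _ hm⟩
    · exact ⟨h, g5 _ hm (pvSfx_len s 5 (by norm_num) h.le)⟩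
  have c4 : (4 < s.toList.length ∧ pvSfx s 4 ∈ pvQs4) ↔ (4 < s.toList.length ∧ pvSfx s 4 ∈ pvBinanceQuoteSet) := by
    constructor <;> rintro ⟨h, hm⟩
    · exact ⟨h, b4 _ hm⟩
    · exact ⟨h, g4 _ hm (pvSfx_len s 4 (by norm_num) h.le)⟩
  have c3 : (3 < s.toList.length ∧ pvSfx s 3 ∈ pvQs3) ↔ (3 < s.toList.length ∧ pvSfx s 3 ∈ pvBinanceQuoteSet) := by
    constructor <;> rintro ⟨h, hm⟩
    · exact ⟨h, b3 _ hm⟩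
    · exact ⟨h, g3 _ hm (pvSfx_len s 3 (by norm_num) h.le)⟩
  simp only [pvLoopA, pvLoopB]
  exact if_congr c5 rfl (if_congr c4 rfl (if_congr c3 rfl rfl))

-- ===== VERDICT (by name: the statement is the Claim_ definition above) =====
theorem parse_symbol_base_quote_py_spec : Claim_equal_parse_symbol_base_quote_py := by
  intro venue symbol _
  unfold Spec_parse_symbol_base_quote_py parse_symbol_base_quote_py parse_symbol_base_quote_py_alt
  by_cases h1 : (venue == "upbit") = true
  · rw [if_pos h1, if_pos h1]
    by_cases hm : (PySem.Str.isIn "-" symbol) = true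
    · rw [if_pos hm, if_pos hm]
      rcases hsp : PySem.Str.splitMax? symbol "-" 1 with _ | l
      · rfl
      · rcases l with _ | ⟨q, l⟩
        · rfl
        · rcases l with _ | ⟨b, l⟩ <;> rfl
    · rw [if_neg hm, if_neg hm]
  · rw [if_neg h1, if_neg h1]
    by_cases h2 : (venue == "binance") = true
    · rw [if_pos h2, if_pos h2]
      exact pvBinEq symbol
    · rw [if_neg h2, if_neg h2]
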